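-- pv_equiv track=rewrite | github.com/amangalampalli/agentic-traffic | env/utils.py | _is_boundary_intersection
-- ===== SOURCE A (Python) =====
-- def _is_boundary_intersection(
--     intersection_id: str,
--     district_id: str,
--     incoming_roads: list[dict],
--     outgoing_roads: list[dict],
--     intersection_to_district: dict[str, str],
-- ) -> bool:
--     connected_intersections = {
--         road["startIntersection"] for road in incoming_roads
--     } | {
--         road["endIntersection"] for road in outgoing_roads
--     }
--     connected_intersections.discard(intersection_id)
--     for neighbor_intersection_id in connected_intersections:
--         neighbor_district_id = intersection_to_district.get(neighbor_intersection_id)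
--         if neighbor_district_id is not None and neighbor_district_id != district_id:
--             return True
--     return False
-- ===== SOURCE B (Python) =====
-- def _is_boundary_intersection(
--     intersection_id: str,
--     district_id: str,
--     incoming_roads: list[dict],
--     outgoing_roads: list[dict],
--     intersection_to_district: dict[str, str],
-- ) -> bool:
--     # Inverted traversal: walk the district map once; for each intersection that
--     # lies in a *different* district, check whether some road connects it here.
--     for other_id, other_district in intersection_to_district.items():
--         if other_id == intersection_id or other_district == district_id:
--             continue
--         if any(road["startIntersection"] == other_id for road in incoming_roads):
--             return True
--         if any(road["endIntersection"] == other_id for road in outgoing_roads):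
--             return True
--     return False
-- ===== Notes on version B (the rewrite author's own statement) =====
-- stated objective: alternative
-- what changed: A collects the neighbouring intersections from the roads into a set and then looks each one up in the district map; B inverts the traversal: it iterates over the district map itself, and for each intersection recorded in a different district scans the road lists for a road connecting it, returning True on the first hit - no neighbour set and no dict lookups at all.
import Mathlib
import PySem

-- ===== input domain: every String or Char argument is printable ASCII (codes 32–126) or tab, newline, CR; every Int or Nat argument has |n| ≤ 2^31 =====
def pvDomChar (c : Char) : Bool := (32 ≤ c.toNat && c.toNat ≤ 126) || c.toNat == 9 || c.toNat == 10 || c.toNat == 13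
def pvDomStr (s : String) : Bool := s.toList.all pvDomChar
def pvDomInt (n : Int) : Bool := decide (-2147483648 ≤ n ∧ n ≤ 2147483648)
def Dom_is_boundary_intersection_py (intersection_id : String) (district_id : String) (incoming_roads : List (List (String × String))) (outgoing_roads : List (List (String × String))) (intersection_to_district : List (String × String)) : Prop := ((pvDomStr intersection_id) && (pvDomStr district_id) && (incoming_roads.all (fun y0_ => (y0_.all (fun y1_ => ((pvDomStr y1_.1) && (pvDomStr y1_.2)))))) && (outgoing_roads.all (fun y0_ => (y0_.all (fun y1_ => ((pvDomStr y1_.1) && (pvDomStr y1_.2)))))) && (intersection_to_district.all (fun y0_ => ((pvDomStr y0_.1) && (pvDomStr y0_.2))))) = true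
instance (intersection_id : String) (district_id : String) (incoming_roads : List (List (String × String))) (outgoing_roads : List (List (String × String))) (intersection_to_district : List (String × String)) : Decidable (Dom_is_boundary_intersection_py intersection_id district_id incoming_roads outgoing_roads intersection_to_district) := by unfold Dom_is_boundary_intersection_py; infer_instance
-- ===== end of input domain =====

-- ===== PORT A =====
-- B inverts the traversal: instead of building the neighbour set from the roads and
-- looking each neighbour up in the district map (A), it walks the district map once and
-- scans the road lists for a connecting road (objective: alternative).
-- road[k]: Python dict subscript; exact where the key is present (Pre_ excludes the KeyError case).
def pvRoadGet (road : List (String × String)) (k : String) : String :=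
  ((PySem.Dict.mk road).get? k).getD ""

def is_boundary_intersection_py (intersection_id : String) (district_id : String) (incoming_roads : List (List (String × String))) (outgoing_roads : List (List (String × String))) (intersection_to_district : List (String × String)) : Bool :=
  let connected : PySem.Set String :=
    PySem.Set.union
      (PySem.Set.ofList (incoming_roads.map (fun road => pvRoadGet road "startIntersection")))
      (PySem.Set.ofList (outgoing_roads.map (fun road => pvRoadGet road "endIntersection")))
  let connected := PySem.Set.discard connected intersection_id
  -- the for-loop with early return True / final return False = any over the set (order-independent)
  connected.any (fun neighbor =>
    match (PySem.Dict.mk intersection_to_district).get? neighbor with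
    | some d => d != district_id
    | none => false)

-- ===== PORT B =====
-- the for-loop of Source B over intersection_to_district.items() with continue / early return
def pvAltLoop (intersection_id : String) (district_id : String) (incoming_roads : List (List (String × String))) (outgoing_roads : List (List (String × String))) : List (String × String) → Bool
  | [] => false
  | (other_id, other_district) :: rest =>
    if other_id == intersection_id || other_district == district_id then
      pvAltLoop intersection_id district_id incoming_roads outgoing_roads rest
    else if incoming_roads.any (fun road => pvRoadGet road "startIntersection" == other_id) then
      true
    else if outgoing_roads.any (fun road => pvRoadGet road "endIntersection" == other_id) then
      true
    else
      pvAltLoop intersection_id district_id incoming_roads outgoing_roads rest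

def is_boundary_intersection_py_alt (intersection_id : String) (district_id : String) (incoming_roads : List (List (String × String))) (outgoing_roads : List (List (String × String))) (intersection_to_district : List (String × String)) : Bool :=
  pvAltLoop intersection_id district_id incoming_roads outgoing_roads intersection_to_district

-- ===== PRECONDITION & SPEC =====
-- Pre_ excludes (i) the inputs where Python raises KeyError (a road missing the subscripted key)
-- and (ii) association lists with duplicate keys, which do not represent any Python dict
-- (dict keys are unique), so every real input satisfies the Nodup clause.
def Pre_is_boundary_intersection_py (intersection_id : String) (district_id : String) (incoming_roads : List (List (String × String))) (outgoing_roads : List (List (String × String))) (intersection_to_district : List (String × String)) : Prop :=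
  (∀ road ∈ incoming_roads, ((PySem.Dict.mk road).get? "startIntersection").isSome = true) ∧
  (∀ road ∈ outgoing_roads, ((PySem.Dict.mk road).get? "endIntersection").isSome = true) ∧
  (intersection_to_district.map Prod.fst).Nodup
instance (intersection_id : String) (district_id : String) (incoming_roads : List (List (String × String))) (outgoing_roads : List (List (String × String))) (intersection_to_district : List (String × String)) : Decidable (Pre_is_boundary_intersection_py intersection_id district_id incoming_roads outgoing_roads intersection_to_district) := by unfold Pre_is_boundary_intersection_py; infer_instance

def pvWitness_is_boundary_intersection_py : String × String × (List (List (String × String))) × (List (List (String × String))) × (List (String × String)) :=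
  ("i", "d", [[("startIntersection", "j")]], [[("endIntersection", "k")]], [("j", "e")])

def Spec_is_boundary_intersection_py (intersection_id : String) (district_id : String) (incoming_roads : List (List (String × String))) (outgoing_roads : List (List (String × String))) (intersection_to_district : List (String × String)) (out : Bool) : Prop := out = is_boundary_intersection_py_alt intersection_id district_id incoming_roads outgoing_roads intersection_to_district
instance (intersection_id : String) (district_id : String) (incoming_roads : List (List (String × String))) (outgoing_roads : List (List (String × String))) (intersection_to_district : List (String × String)) (out : Bool) : Decidable (Spec_is_boundary_intersection_py intersection_id district_id incoming_roads outgoing_roads intersection_to_district out) := by unfold Spec_is_boundary_intersection_py; infer_instance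

-- ===== CLAIM (what is proved, stated in full; the proofs are below) =====
def Claim_equal_is_boundary_intersection_py : Prop := ∀ (intersection_id : String) (district_id : String) (incoming_roads : List (List (String × String))) (outgoing_roads : List (List (String × String))) (intersection_to_district : List (String × String)), Dom_is_boundary_intersection_py intersection_id district_id incoming_roads outgoing_roads intersection_to_district → Pre_is_boundary_intersection_py intersection_id district_id incoming_roads outgoing_roads intersection_to_district → Spec_is_boundary_intersection_py intersection_id district_id incoming_roads outgoing_roads intersection_to_district (is_boundary_intersection_py intersection_id district_id incoming_roads outgoing_roads intersection_to_district)

-- ===== LEMMAS AND PROOFS =====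
-- B's loop is true iff some map entry (k, v) has k ≠ intersection_id, v ≠ district_id and
-- some road connects k here.
theorem pvAltLoop_iff (iid did : String) (inc outr : List (List (String × String))) (m : List (String × String)) :
    pvAltLoop iid did inc outr m = true ↔
      ∃ p ∈ m, p.1 ≠ iid ∧ p.2 ≠ did ∧
        ((inc.any (fun road => pvRoadGet road "startIntersection" == p.1)) = true ∨
         (outr.any (fun road => pvRoadGet road "endIntersection" == p.1)) = true) := by
  induction m with
  | nil => simp [pvAltLoop]
  | cons p rest ih =>
    obtain ⟨k, v⟩ := p
    by_cases hskip : k = iid ∨ v = did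
    · have hc : (k == iid || v == did) = true := by
        rcases hskip with h | h <;> simp [h]
      rw [pvAltLoop, if_pos hc, ih]
      constructor
      · rintro ⟨p, hp, h⟩; exact ⟨p, List.mem_cons_of_mem _ hp, h⟩
      · rintro ⟨p, hp, h1, h2, h3⟩
        rcases List.mem_cons.mp hp with hp | hp
        · subst hp; rcases hskip with h | h
          · exact absurd h h1
          · exact absurd h h2
        · exact ⟨p, hp, h1, h2, h3⟩
    · push Not at hskip
      have hc : (k == iid || v == did) = false := by simp [hskip.1, hskip.2]
      rw [pvAltLoop, if_neg (by simp [hc])]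
      split_ifs with h1 h2
      · simp only [true_iff]
        exact ⟨(k, v), List.mem_cons_self, hskip.1, hskip.2, Or.inl h1⟩
      · simp only [true_iff]
        exact ⟨(k, v), List.mem_cons_self, hskip.1, hskip.2, Or.inr h2⟩
      · rw [ih]
        constructor
        · rintro ⟨p, hp, h⟩; exact ⟨p, List.mem_cons_of_mem _ hp, h⟩
        · rintro ⟨p, hp, ha, hb, hor⟩
          rcases List.mem_cons.mp hp with hp | hp
          · subst hp
            rcases hor with h | h
            · exact absurd h (by simp [h1])
            · exact absurd h (by simp [h2])
          · exact ⟨p, hp, ha, hb, hor⟩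

theorem pv_iff (iid did : String) (inc outr : List (List (String × String))) (m : List (String × String))
    (hnd : (m.map Prod.fst).Nodup) :
    is_boundary_intersection_py iid did inc outr m =
    is_boundary_intersection_py_alt iid did inc outr m := by
  have hknd : (PySem.Dict.mk m).keys.Nodup := by
    simpa [PySem.Dict.keys] using hnd
  simp only [is_boundary_intersection_py, is_boundary_intersection_py_alt]
  rw [Bool.eq_iff_iff, pvAltLoop_iff]
  simp only [List.any_eq_true, PySem.Set.mem_discard, PySem.Set.mem_union, PySem.Set.mem_ofList,
    List.mem_map, beq_iff_eq]
  constructor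
  · rintro ⟨n, ⟨⟨r, hr, rfl⟩ | ⟨r, hr, rfl⟩, hne⟩, hp⟩
    all_goals {
      rcases hd : (PySem.Dict.mk m).get? (pvRoadGet r _) with _ | d
      · rw [hd] at hp; exact absurd hp (by simp)
      · have hmem := PySem.Dict.mem_items_of_get?_eq_some _ hd
        refine ⟨_, hmem, hne, ?_, ?_⟩
        · rw [hd] at hp; simpa using hp
        · first
          | exact Or.inl ⟨r, hr, rfl⟩
          | exact Or.inr ⟨r, hr, rfl⟩ }
  · rintro ⟨⟨k, v⟩, hp, hki, hvd, hroad⟩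
    have hget : (PySem.Dict.mk m).get? k = some v :=
      PySem.Dict.get?_of_mem_items _ hp hknd
    refine ⟨k, ⟨?_, hki⟩, by simp [hget, hvd]⟩
    rcases hroad with ⟨r, hr, hk⟩ | ⟨r, hr, hk⟩
    · exact Or.inl ⟨r, hr, hk⟩
    · exact Or.inr ⟨r, hr, hk⟩

-- ===== VERDICT (by name: the statement is the Claim_ definition above) =====
theorem is_boundary_intersection_py_spec : Claim_equal_is_boundary_intersection_py := by
  intro iid did inc outr m _ hpre
  exact pv_iff iid did inc outr m hpre.2.2
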